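-- pv_equiv track=rewrite | github.com/albine/screwdriver | script/read_mmap_v2.py | magic_to_str
-- ===== SOURCE A (Python) =====
-- def magic_to_str(magic):
--     """将 magic 转换为字符串"""
--     chars = []
--     for i in range(4):
--         c = (magic >> (i * 8)) & 0xFF
--         if 32 <= c <= 126:
--             chars.append(chr(c))
--         else:
--             chars.append('.')
--     return ''.join(chars)
-- ===== SOURCE B (Python) =====
-- # Table-driven: precomputed byte-to-char translation table, bytes + translate instead of a per-char shift/branch loop.
-- _TABLE = bytes(c if 32 <= c <= 126 else ord('.') for c in range(256))
--
-- def magic_to_str(magic):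
--     return (magic & 0xFFFFFFFF).to_bytes(4, 'little').translate(_TABLE).decode('ascii')
-- ===== Notes on version B (the rewrite author's own statement) =====
-- stated objective: idiomatic
-- what changed: Replaces the per-byte shift-and-branch loop with a precomputed byte-to-char translation table applied to the little-endian bytes of the masked integer (bytes.translate).
import Mathlib
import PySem

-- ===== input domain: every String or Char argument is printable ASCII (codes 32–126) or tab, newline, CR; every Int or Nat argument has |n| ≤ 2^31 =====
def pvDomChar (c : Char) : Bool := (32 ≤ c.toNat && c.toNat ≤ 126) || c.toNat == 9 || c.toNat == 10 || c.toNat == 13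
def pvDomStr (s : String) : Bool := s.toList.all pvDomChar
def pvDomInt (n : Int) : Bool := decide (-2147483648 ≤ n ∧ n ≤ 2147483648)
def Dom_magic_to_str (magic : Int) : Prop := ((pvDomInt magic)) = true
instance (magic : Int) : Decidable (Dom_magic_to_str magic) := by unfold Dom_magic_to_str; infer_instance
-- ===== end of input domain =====

-- B replaces A's per-byte shift-and-branch loop by a precomputed translation table applied to the little-endian bytes of the masked value (idiomatic).

-- ===== PORT A =====
-- `(magic >> (i*8)) & 0xFF` is exactly floor-division by 2^(i*8) followed by Python-mod 256 (exact for every Int).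
def magic_to_str (magic : Int) : String :=
  let chars : List Char := (List.range 4).foldl (fun acc i =>
    let c : Int := PySem.Int.mod (PySem.Int.floordiv magic (2 ^ (i * 8))) 256
    if 32 ≤ c ∧ c ≤ 126 then acc ++ [Char.ofNat c.toNat] else acc ++ ['.']) []
  String.mk chars

-- ===== PORT B =====
-- the translation table: byte value ↦ itself if printable, else '.' (46)
def pvTable : List Nat := (List.range 256).map (fun c => if 32 ≤ c ∧ c ≤ 126 then c else 46)

def magic_to_str_alt (magic : Int) : String :=
  let m : Nat := (PySem.Int.mod magic 4294967296).toNat        -- magic & 0xFFFFFFFF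
  let bs : List Nat := [m % 256, m / 256 % 256, m / 65536 % 256, m / 16777216 % 256]  -- to_bytes(4,'little')
  String.mk (bs.map (fun b => Char.ofNat (pvTable.getD b 46))) -- translate(table).decode('ascii')

-- ===== PRECONDITION & SPEC =====
def Spec_magic_to_str (magic : Int) (out : String) : Prop := out = magic_to_str_alt magic
instance (magic : Int) (out : String) : Decidable (Spec_magic_to_str magic out) := by unfold Spec_magic_to_str; infer_instance

-- ===== CLAIM (what is proved, stated in full; the proofs are below) =====
def Claim_equal_magic_to_str : Prop := ∀ (magic : Int), Dom_magic_to_str magic → Spec_magic_to_str magic (magic_to_str magic)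

-- ===== LEMMAS AND PROOFS =====

-- the table lookup is the printable-or-dot function
theorem pvTable_getD (b : Nat) (hb : b < 256) :
    pvTable.getD b 46 = if 32 ≤ b ∧ b ≤ 126 then b else 46 := by
  simp [pvTable, List.getD, hb]

-- per-byte agreement between A's branch and B's table-driven char
theorem pv_byte_char (x : Int) (b : Nat) (hx : x = (b : Int)) (hb : b < 256) :
    (if 32 ≤ x ∧ x ≤ 126 then Char.ofNat x.toNat else '.') = Char.ofNat (pvTable.getD b 46) := by
  subst hx
  rw [pvTable_getD b hb]
  by_cases h : 32 ≤ b ∧ b ≤ 126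
  · simp [h]
  · have h' : ¬ (32 ≤ (b:Int) ∧ (b:Int) ≤ 126) := by
      intro hc; exact h ⟨by exact_mod_cast hc.1, by exact_mod_cast hc.2⟩
    simp [h]

theorem pv_div_mod (x : Int) (k c : Int) (hk : 0 < k) (hc : (4294967296:Int) = k * 256 * c) :
    x / k % 256 = (x % 4294967296) / k % 256 := by
  rw [Int.emod_def x 4294967296]
  set q := x / 4294967296 with hq
  have h1 : x - 4294967296 * q = x + (-(256 * c * q)) * k := by rw [hc]; ring
  rw [h1, Int.add_mul_ediv_right _ _ (by omega)]
  set y := x / k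
  set z := c * q
  have h2 : y + -(256 * c * q) = y - 256 * z := by ring
  rw [h2]
  omega

-- A's byte i equals B's byte i (ints vs nats)
theorem pv_byte_eq (magic kI : Int) (k c : Nat) (hkk : kI = (k:Int)) (hk : 0 < k)
    (hc : (4294967296:Int) = (k:Int) * 256 * c) :
    PySem.Int.mod (PySem.Int.floordiv magic kI) 256
      = (((PySem.Int.mod magic 4294967296).toNat / k % 256 : Nat) : Int) := by
  subst hkk
  rw [PySem.Int.mod_eq_emod_of_pos (by norm_num : (0:Int) < 4294967296),
      PySem.Int.floordiv_eq_ediv_of_pos (by exact_mod_cast hk),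
      PySem.Int.mod_eq_emod_of_pos (by norm_num : (0:Int) < 256)]
  have hnn : (0:Int) ≤ magic % 4294967296 := Int.emod_nonneg _ (by norm_num)
  push_cast [Int.natCast_div, Int.toNat_of_nonneg hnn]
  exact pv_div_mod magic k c (by exact_mod_cast hk) hc

theorem magic_to_str_spec : Claim_equal_magic_to_str := by
  intro magic _
  unfold Spec_magic_to_str magic_to_str magic_to_str_alt
  have hsplit : ∀ (acc : List Char) (c : Int),
      (if 32 ≤ c ∧ c ≤ 126 then acc ++ [Char.ofNat c.toNat] else acc ++ ['.'])
        = acc ++ [if 32 ≤ c ∧ c ≤ 126 then Char.ofNat c.toNat else '.'] := by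
    intro acc c; split <;> rfl
  have e0 := pv_byte_eq magic (2 ^ (0 * 8)) 1 16777216 (by norm_num) (by norm_num) (by norm_num)
  have e1 := pv_byte_eq magic (2 ^ (1 * 8)) 256 65536 (by norm_num) (by norm_num) (by norm_num)
  have e2 := pv_byte_eq magic (2 ^ (2 * 8)) 65536 256 (by norm_num) (by norm_num) (by norm_num)
  have e3 := pv_byte_eq magic (2 ^ (3 * 8)) 16777216 1 (by norm_num) (by norm_num) (by norm_num)
  simp only [Nat.div_one] at e0
  have hb : ∀ n : Nat, n % 256 < 256 := fun n => Nat.mod_lt _ (by norm_num)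
  simp only [show List.range 4 = [0, 1, 2, 3] from rfl, List.foldl, hsplit, List.map,
    List.nil_append, List.cons_append]
  exact congrArg String.mk (by
    rw [pv_byte_char _ _ e0 (hb _), pv_byte_char _ _ e1 (hb _),
        pv_byte_char _ _ e2 (hb _), pv_byte_char _ _ e3 (hb _)])
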